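-- pv_equiv track=rewrite | github.com/PapaPandroni/AutoCutV2 | src/clip_assembler.py | apply_variety_pattern
-- ===== SOURCE A (Python) =====
-- from typing import Dict, List, Tuple, Optional, Any
--
-- VARIETY_PATTERNS = {
--     "energetic": [1, 1, 2, 1, 1, 4],  # Mostly fast with occasional pause
--     "buildup": [4, 2, 2, 1, 1, 1],  # Start slow, increase pace
--     "balanced": [2, 1, 2, 4, 2, 1],  # Mixed pacing
--     "dramatic": [1, 1, 1, 1, 8],  # Fast cuts then long hold
-- }
--
-- def apply_variety_pattern(pattern_name: str, beat_count: int) -> List[int]: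
--     """Apply variety pattern to determine clip lengths.
--
--     Args:
--         pattern_name: Name of variety pattern to use
--         beat_count: Total number of beats to fill
--
--     Returns:
--         List of beat multipliers for each clip
--     """
--     if pattern_name not in VARIETY_PATTERNS:
--         pattern_name = "balanced"
--
--     pattern = VARIETY_PATTERNS[pattern_name]
--     result = []
--     pattern_index = 0
--     remaining_beats = beat_count
--
--     while remaining_beats > 0:
--         multiplier = pattern[pattern_index % len(pattern)]
--         if multiplier <= remaining_beats:
--             result.append(multiplier)
--             remaining_beats -= multiplier
--         else:
--             result.append(remaining_beats)
--             remaining_beats = 0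
--         pattern_index += 1
--
--     return result
-- ===== SOURCE B (Python) =====
-- from typing import Dict, List, Tuple, Optional, Any
--
-- VARIETY_PATTERNS = {
--     "energetic": [1, 1, 2, 1, 1, 4],  # Mostly fast with occasional pause
--     "buildup": [4, 2, 2, 1, 1, 1],  # Start slow, increase pace
--     "balanced": [2, 1, 2, 4, 2, 1],  # Mixed pacing
--     "dramatic": [1, 1, 1, 1, 8],  # Fast cuts then long hold
-- }
--
-- def apply_variety_pattern(pattern_name: str, beat_count: int) -> List[int]:
--     """Apply variety pattern: bulk-copy whole cycles, then one pass for the tail."""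
--     if pattern_name not in VARIETY_PATTERNS:
--         pattern_name = "balanced"
--     pattern = VARIETY_PATTERNS[pattern_name]
--     if beat_count <= 0:
--         return []
--     cycle_sum = sum(pattern)
--     full_cycles = beat_count // cycle_sum
--     result = list(pattern) * full_cycles
--     remaining = beat_count - full_cycles * cycle_sum
--     for m in pattern:
--         if remaining <= 0:
--             break
--         if m <= remaining:
--             result.append(m)
--             remaining -= m
--         else:
--             result.append(remaining)
--             remaining = 0
--     return result
-- ===== Notes on version B (the rewrite author's own statement) =====
-- stated objective: faster
-- what changed: Replaces the per-beat cyclic modulo-index while-loop with bulk computation: full cycles are emitted at once via beat_count // sum(pattern) and list repetition, and only the partial tail cycle is handled by a single pass over the pattern.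
import Mathlib
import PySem

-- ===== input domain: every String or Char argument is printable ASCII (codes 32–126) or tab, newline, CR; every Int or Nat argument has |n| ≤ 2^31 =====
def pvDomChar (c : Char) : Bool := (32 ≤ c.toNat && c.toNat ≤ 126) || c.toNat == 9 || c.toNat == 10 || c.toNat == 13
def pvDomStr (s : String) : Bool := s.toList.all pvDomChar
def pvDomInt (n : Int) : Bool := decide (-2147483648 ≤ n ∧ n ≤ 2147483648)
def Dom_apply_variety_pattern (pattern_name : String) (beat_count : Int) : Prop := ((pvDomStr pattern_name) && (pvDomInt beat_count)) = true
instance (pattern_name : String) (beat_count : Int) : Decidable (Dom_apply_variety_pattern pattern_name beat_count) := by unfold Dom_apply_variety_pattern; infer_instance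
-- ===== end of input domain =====

-- B replaces A's per-beat cyclic modulo-index loop by bulk whole-cycle repetition (beat_count // sum(pattern))
-- plus one single pass over the pattern for the partial tail cycle.


-- shared module constant, used identically by both Pythons
def VARIETY_PATTERNS : PySem.Dict String (List Int) :=
  PySem.Dict.ofList
    [("energetic", [1, 1, 2, 1, 1, 4]),
     ("buildup", [4, 2, 2, 1, 1, 1]),
     ("balanced", [2, 1, 2, 4, 2, 1]),
     ("dramatic", [1, 1, 1, 1, 8])]

-- the two identical opening lines of A and B: default unknown names to "balanced", then look up
def pvPatternOf (pattern_name : String) : List Int :=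
  let pn := if VARIETY_PATTERNS.contains pattern_name then pattern_name else "balanced"
  (VARIETY_PATTERNS.get? pn).getD []

-- ===== PORT A =====
-- A's while-loop, step for step; fuel = beat_count.toNat is a termination guard only
-- (every multiplier in every pattern is ≥ 1, so each iteration consumes at least one beat).
def avpLoop (p : List Int) (fuel : Nat) (idx : Nat) (r : Int) : List Int :=
  match fuel with
  | 0 => []
  | fuel + 1 =>
    if r > 0 then
      let m := p.getD (idx % p.length) 0
      if m ≤ r then m :: avpLoop p fuel (idx + 1) (r - m)
      else [r]
    else []

def apply_variety_pattern (pattern_name : String) (beat_count : Int) : List Int :=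
  let pattern := pvPatternOf pattern_name
  avpLoop pattern beat_count.toNat 0 beat_count

-- ===== PORT B =====
-- B's tail pass: one walk over the pattern while remaining > 0
def tailFill : List Int → Int → List Int
  | [], _ => []
  | m :: rest, r => if r ≤ 0 then [] else if m ≤ r then m :: tailFill rest (r - m) else [r]

def apply_variety_pattern_alt (pattern_name : String) (beat_count : Int) : List Int :=
  let pattern := pvPatternOf pattern_name
  if beat_count ≤ 0 then []
  else
    let cycle_sum := pattern.sum
    let full_cycles := PySem.Int.floordiv beat_count cycle_sum
    let remaining := beat_count - full_cycles * cycle_sum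
    (List.replicate full_cycles.toNat pattern).flatten ++ tailFill pattern remaining

-- ===== PRECONDITION & SPEC =====
def Spec_apply_variety_pattern (pattern_name : String) (beat_count : Int) (out : List Int) : Prop := out = apply_variety_pattern_alt pattern_name beat_count
instance (pattern_name : String) (beat_count : Int) (out : List Int) : Decidable (Spec_apply_variety_pattern pattern_name beat_count out) := by unfold Spec_apply_variety_pattern; infer_instance

-- ===== CLAIM (what is proved, stated in full; the proofs are below) =====
def Claim_equal_apply_variety_pattern : Prop := ∀ (pattern_name : String) (beat_count : Int), Dom_apply_variety_pattern pattern_name beat_count → Spec_apply_variety_pattern pattern_name beat_count (apply_variety_pattern pattern_name beat_count)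

-- ===== LEMMAS AND PROOFS =====

lemma avpLoop_succ (p : List Int) (f i : Nat) (r : Int) :
    avpLoop p (f + 1) i r =
      if r > 0 then
        (if p.getD (i % p.length) 0 ≤ r then
          p.getD (i % p.length) 0 :: avpLoop p f (i + 1) (r - p.getD (i % p.length) 0)
         else [r])
      else [] := rfl

lemma avpLoop_nonpos (p : List Int) (f i : Nat) (r : Int) (h : r ≤ 0) :
    avpLoop p f i r = [] := by
  cases f with
  | zero => rfl
  | succ f => rw [avpLoop_succ, if_neg (by omega)]

lemma avpLoop_idx_add_len (p : List Int) :
    ∀ (f i : Nat) (r : Int), avpLoop p f (i + p.length) r = avpLoop p f i r := by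
  intro f
  induction f with
  | zero => intro i r; rfl
  | succ f ih =>
    intro i r
    rw [avpLoop_succ, avpLoop_succ, Nat.add_mod_right]
    rw [show i + p.length + 1 = (i + 1) + p.length by omega, ih]

lemma avpLoop_fuel_irrel (p : List Int) (hne : p ≠ []) (hp : ∀ m ∈ p, 1 ≤ m) :
    ∀ (f1 f2 i : Nat) (r : Int), r.toNat ≤ f1 → r.toNat ≤ f2 →
      avpLoop p f1 i r = avpLoop p f2 i r := by
  intro f1
  induction f1 with
  | zero =>
    intro f2 i r h1 _
    rw [avpLoop_nonpos p 0 i r (by omega), avpLoop_nonpos p f2 i r (by omega)]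
  | succ f1 ih =>
    intro f2 i r h1 h2
    by_cases hr : r ≤ 0
    · rw [avpLoop_nonpos p _ i r hr, avpLoop_nonpos p f2 i r hr]
    · obtain ⟨f2', rfl⟩ : ∃ f2', f2 = f2' + 1 := ⟨f2 - 1, by omega⟩
      rw [avpLoop_succ, avpLoop_succ]
      have hm : p.getD (i % p.length) 0 ∈ p := by
        have hlen : 0 < p.length := List.length_pos_iff.mpr hne
        have hlt : i % p.length < p.length := Nat.mod_lt _ hlen
        rw [List.getD_eq_getElem _ _ hlt]
        exact List.getElem_mem _
      have h1m : 1 ≤ p.getD (i % p.length) 0 := hp _ hm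
      split_ifs with hx hy
      · rw [ih f2' (i + 1) _ (by omega) (by omega)]
      all_goals rfl

-- one full-cycle unfolding, per pattern
lemma cycle_energetic (f : Nat) (r : Int) (h : 10 ≤ r) :
    avpLoop [1, 1, 2, 1, 1, 4] (f + 1 + 1 + 1 + 1 + 1 + 1) 0 r =
      [1, 1, 2, 1, 1, 4] ++ avpLoop [1, 1, 2, 1, 1, 4] f 6 (r - 10) := by
  simp only [avpLoop_succ, List.length_cons, List.length_nil, List.getD]
  norm_num
  split_ifs <;> try omega
  rw [show r - 1 - 1 - 2 - 1 - 1 - 4 = r - 10 by ring]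

lemma cycle_buildup (f : Nat) (r : Int) (h : 11 ≤ r) :
    avpLoop [4, 2, 2, 1, 1, 1] (f + 1 + 1 + 1 + 1 + 1 + 1) 0 r =
      [4, 2, 2, 1, 1, 1] ++ avpLoop [4, 2, 2, 1, 1, 1] f 6 (r - 11) := by
  simp only [avpLoop_succ, List.length_cons, List.length_nil, List.getD]
  norm_num
  split_ifs <;> try omega
  rw [show r - 4 - 2 - 2 - 1 - 1 - 1 = r - 11 by ring]

lemma cycle_balanced (f : Nat) (r : Int) (h : 12 ≤ r) :
    avpLoop [2, 1, 2, 4, 2, 1] (f + 1 + 1 + 1 + 1 + 1 + 1) 0 r =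
      [2, 1, 2, 4, 2, 1] ++ avpLoop [2, 1, 2, 4, 2, 1] f 6 (r - 12) := by
  simp only [avpLoop_succ, List.length_cons, List.length_nil, List.getD]
  norm_num
  rw [if_pos (show (0:ℤ) < r by omega), if_pos (show (2:ℤ) ≤ r by omega),
      if_pos (show (2:ℤ) < r by omega), if_pos (show (1:ℤ) ≤ r - 2 by omega),
      if_pos (show (1:ℤ) < r - 2 by omega), if_pos (show (2:ℤ) < r - 2 by omega),
      if_pos (show (2:ℤ) < r - 2 - 1 by omega), if_pos (show (4:ℤ) ≤ r - 2 - 1 - 2 by omega),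
      if_pos (show (4:ℤ) < r - 2 - 1 - 2 by omega), if_pos (show (2:ℤ) ≤ r - 2 - 1 - 2 - 4 by omega),
      if_pos (show (2:ℤ) < r - 2 - 1 - 2 - 4 by omega), if_pos (show (1:ℤ) ≤ r - 2 - 1 - 2 - 4 - 2 by omega),
      show r - 2 - 1 - 2 - 4 - 2 - 1 = r - 12 by ring]

lemma cycle_dramatic (f : Nat) (r : Int) (h : 12 ≤ r) :
    avpLoop [1, 1, 1, 1, 8] (f + 1 + 1 + 1 + 1 + 1) 0 r =
      [1, 1, 1, 1, 8] ++ avpLoop [1, 1, 1, 1, 8] f 5 (r - 12) := by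
  simp only [avpLoop_succ, List.length_cons, List.length_nil, List.getD]
  norm_num
  split_ifs <;> try omega
  rw [show r - 1 - 1 - 1 - 1 - 8 = r - 12 by ring]

lemma main_energetic : ∀ (n f : Nat) (r : Int), r.toNat ≤ n → r.toNat ≤ f →
    avpLoop [1, 1, 2, 1, 1, 4] f 0 r =
      (if r ≤ 0 then [] else
        (List.replicate (PySem.Int.floordiv r 10).toNat [1, 1, 2, 1, 1, 4]).flatten
          ++ tailFill [1, 1, 2, 1, 1, 4] (r - PySem.Int.floordiv r 10 * 10)) := by
  intro n
  induction n with
  | zero =>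
    intro f r h1 h2
    rw [avpLoop_nonpos _ _ _ _ (by omega), if_pos (by omega)]
  | succ n ih =>
    intro f r h1 h2
    by_cases hr : r ≤ 0
    · rw [avpLoop_nonpos _ _ _ _ hr, if_pos hr]
    · rw [if_neg hr]
      by_cases hge : (10 : Int) ≤ r
      · obtain ⟨f', rfl⟩ : ∃ f', f = f' + 1 + 1 + 1 + 1 + 1 + 1 := ⟨f - 6, by omega⟩
        rw [cycle_energetic f' r hge,
            show avpLoop [1, 1, 2, 1, 1, 4] f' 6 (r - 10) = avpLoop [1, 1, 2, 1, 1, 4] f' 0 (r - 10) from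
              avpLoop_idx_add_len [1, 1, 2, 1, 1, 4] f' 0 (r - 10),
            ih f' (r - 10) (by omega) (by omega)]
        by_cases hz : r - 10 ≤ 0
        · have hrS : r = 10 := by omega
          subst hrS
          decide
        · rw [if_neg hz]
          have hb := (PySem.Int.floordiv_eq_iff_of_pos (show (0:ℤ) < 10 by norm_num)).mp
            (rfl : PySem.Int.floordiv (r - 10) 10 = PySem.Int.floordiv (r - 10) 10)
          have hq : PySem.Int.floordiv r 10 = PySem.Int.floordiv (r - 10) 10 + 1 :=
            (PySem.Int.floordiv_eq_iff_of_pos (by norm_num)).mpr ⟨by omega, by omega⟩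
          rw [hq,
              show (PySem.Int.floordiv (r - 10) 10 + 1).toNat
                  = (PySem.Int.floordiv (r - 10) 10).toNat + 1 by omega,
              List.replicate_succ, List.flatten_cons, List.append_assoc,
              show r - (PySem.Int.floordiv (r - 10) 10 + 1) * 10
                  = r - 10 - PySem.Int.floordiv (r - 10) 10 * 10 by ring]
      · rw [avpLoop_fuel_irrel [1, 1, 2, 1, 1, 4] (by decide) (by decide) f 12 0 r h2 (by omega)]
        have hlo : 1 ≤ r := by omega
        have hhi : r ≤ 9 := by omega
        interval_cases r <;> decide

lemma main_buildup : ∀ (n f : Nat) (r : Int), r.toNat ≤ n → r.toNat ≤ f →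
    avpLoop [4, 2, 2, 1, 1, 1] f 0 r =
      (if r ≤ 0 then [] else
        (List.replicate (PySem.Int.floordiv r 11).toNat [4, 2, 2, 1, 1, 1]).flatten
          ++ tailFill [4, 2, 2, 1, 1, 1] (r - PySem.Int.floordiv r 11 * 11)) := by
  intro n
  induction n with
  | zero =>
    intro f r h1 h2
    rw [avpLoop_nonpos _ _ _ _ (by omega), if_pos (by omega)]
  | succ n ih =>
    intro f r h1 h2
    by_cases hr : r ≤ 0
    · rw [avpLoop_nonpos _ _ _ _ hr, if_pos hr]
    · rw [if_neg hr]
      by_cases hge : (11 : Int) ≤ r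
      · obtain ⟨f', rfl⟩ : ∃ f', f = f' + 1 + 1 + 1 + 1 + 1 + 1 := ⟨f - 6, by omega⟩
        rw [cycle_buildup f' r hge,
            show avpLoop [4, 2, 2, 1, 1, 1] f' 6 (r - 11) = avpLoop [4, 2, 2, 1, 1, 1] f' 0 (r - 11) from
              avpLoop_idx_add_len [4, 2, 2, 1, 1, 1] f' 0 (r - 11),
            ih f' (r - 11) (by omega) (by omega)]
        by_cases hz : r - 11 ≤ 0
        · have hrS : r = 11 := by omega
          subst hrS
          decide
        · rw [if_neg hz]
          have hb := (PySem.Int.floordiv_eq_iff_of_pos (show (0:ℤ) < 11 by norm_num)).mp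
            (rfl : PySem.Int.floordiv (r - 11) 11 = PySem.Int.floordiv (r - 11) 11)
          have hq : PySem.Int.floordiv r 11 = PySem.Int.floordiv (r - 11) 11 + 1 :=
            (PySem.Int.floordiv_eq_iff_of_pos (by norm_num)).mpr ⟨by omega, by omega⟩
          rw [hq,
              show (PySem.Int.floordiv (r - 11) 11 + 1).toNat
                  = (PySem.Int.floordiv (r - 11) 11).toNat + 1 by omega,
              List.replicate_succ, List.flatten_cons, List.append_assoc,
              show r - (PySem.Int.floordiv (r - 11) 11 + 1) * 11
                  = r - 11 - PySem.Int.floordiv (r - 11) 11 * 11 by ring]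
      · rw [avpLoop_fuel_irrel [4, 2, 2, 1, 1, 1] (by decide) (by decide) f 13 0 r h2 (by omega)]
        have hlo : 1 ≤ r := by omega
        have hhi : r ≤ 10 := by omega
        interval_cases r <;> decide

lemma main_balanced : ∀ (n f : Nat) (r : Int), r.toNat ≤ n → r.toNat ≤ f →
    avpLoop [2, 1, 2, 4, 2, 1] f 0 r =
      (if r ≤ 0 then [] else
        (List.replicate (PySem.Int.floordiv r 12).toNat [2, 1, 2, 4, 2, 1]).flatten
          ++ tailFill [2, 1, 2, 4, 2, 1] (r - PySem.Int.floordiv r 12 * 12)) := by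
  intro n
  induction n with
  | zero =>
    intro f r h1 h2
    rw [avpLoop_nonpos _ _ _ _ (by omega), if_pos (by omega)]
  | succ n ih =>
    intro f r h1 h2
    by_cases hr : r ≤ 0
    · rw [avpLoop_nonpos _ _ _ _ hr, if_pos hr]
    · rw [if_neg hr]
      by_cases hge : (12 : Int) ≤ r
      · obtain ⟨f', rfl⟩ : ∃ f', f = f' + 1 + 1 + 1 + 1 + 1 + 1 := ⟨f - 6, by omega⟩
        rw [cycle_balanced f' r hge,
            show avpLoop [2, 1, 2, 4, 2, 1] f' 6 (r - 12) = avpLoop [2, 1, 2, 4, 2, 1] f' 0 (r - 12) from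
              avpLoop_idx_add_len [2, 1, 2, 4, 2, 1] f' 0 (r - 12),
            ih f' (r - 12) (by omega) (by omega)]
        by_cases hz : r - 12 ≤ 0
        · have hrS : r = 12 := by omega
          subst hrS
          decide
        · rw [if_neg hz]
          have hb := (PySem.Int.floordiv_eq_iff_of_pos (show (0:ℤ) < 12 by norm_num)).mp
            (rfl : PySem.Int.floordiv (r - 12) 12 = PySem.Int.floordiv (r - 12) 12)
          have hq : PySem.Int.floordiv r 12 = PySem.Int.floordiv (r - 12) 12 + 1 :=
            (PySem.Int.floordiv_eq_iff_of_pos (by norm_num)).mpr ⟨by omega, by omega⟩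
          rw [hq,
              show (PySem.Int.floordiv (r - 12) 12 + 1).toNat
                  = (PySem.Int.floordiv (r - 12) 12).toNat + 1 by omega,
              List.replicate_succ, List.flatten_cons, List.append_assoc,
              show r - (PySem.Int.floordiv (r - 12) 12 + 1) * 12
                  = r - 12 - PySem.Int.floordiv (r - 12) 12 * 12 by ring]
      · rw [avpLoop_fuel_irrel [2, 1, 2, 4, 2, 1] (by decide) (by decide) f 14 0 r h2 (by omega)]
        have hlo : 1 ≤ r := by omega
        have hhi : r ≤ 11 := by omega
        interval_cases r <;> decide

lemma main_dramatic : ∀ (n f : Nat) (r : Int), r.toNat ≤ n → r.toNat ≤ f →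
    avpLoop [1, 1, 1, 1, 8] f 0 r =
      (if r ≤ 0 then [] else
        (List.replicate (PySem.Int.floordiv r 12).toNat [1, 1, 1, 1, 8]).flatten
          ++ tailFill [1, 1, 1, 1, 8] (r - PySem.Int.floordiv r 12 * 12)) := by
  intro n
  induction n with
  | zero =>
    intro f r h1 h2
    rw [avpLoop_nonpos _ _ _ _ (by omega), if_pos (by omega)]
  | succ n ih =>
    intro f r h1 h2
    by_cases hr : r ≤ 0
    · rw [avpLoop_nonpos _ _ _ _ hr, if_pos hr]
    · rw [if_neg hr]
      by_cases hge : (12 : Int) ≤ r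
      · obtain ⟨f', rfl⟩ : ∃ f', f = f' + 1 + 1 + 1 + 1 + 1 := ⟨f - 5, by omega⟩
        rw [cycle_dramatic f' r hge,
            show avpLoop [1, 1, 1, 1, 8] f' 5 (r - 12) = avpLoop [1, 1, 1, 1, 8] f' 0 (r - 12) from
              avpLoop_idx_add_len [1, 1, 1, 1, 8] f' 0 (r - 12),
            ih f' (r - 12) (by omega) (by omega)]
        by_cases hz : r - 12 ≤ 0
        · have hrS : r = 12 := by omega
          subst hrS
          decide
        · rw [if_neg hz]
          have hb := (PySem.Int.floordiv_eq_iff_of_pos (show (0:ℤ) < 12 by norm_num)).mp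
            (rfl : PySem.Int.floordiv (r - 12) 12 = PySem.Int.floordiv (r - 12) 12)
          have hq : PySem.Int.floordiv r 12 = PySem.Int.floordiv (r - 12) 12 + 1 :=
            (PySem.Int.floordiv_eq_iff_of_pos (by norm_num)).mpr ⟨by omega, by omega⟩
          rw [hq,
              show (PySem.Int.floordiv (r - 12) 12 + 1).toNat
                  = (PySem.Int.floordiv (r - 12) 12).toNat + 1 by omega,
              List.replicate_succ, List.flatten_cons, List.append_assoc,
              show r - (PySem.Int.floordiv (r - 12) 12 + 1) * 12
                  = r - 12 - PySem.Int.floordiv (r - 12) 12 * 12 by ring]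
      · rw [avpLoop_fuel_irrel [1, 1, 1, 1, 8] (by decide) (by decide) f 14 0 r h2 (by omega)]
        have hlo : 1 ≤ r := by omega
        have hhi : r ≤ 11 := by omega
        interval_cases r <;> decide

lemma pvPatternOf_default (name : String) (h1 : name ≠ "energetic") (h2 : name ≠ "buildup")
    (h3 : name ≠ "balanced") (h4 : name ≠ "dramatic") :
    pvPatternOf name = [2, 1, 2, 4, 2, 1] := by
  have hc : VARIETY_PATTERNS.contains name = false := by
    rw [Bool.eq_false_iff]
    intro hmem
    rw [PySem.Dict.contains_iff_mem_keys] at hmem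
    have hk : VARIETY_PATTERNS.keys = ["energetic", "buildup", "balanced", "dramatic"] := by decide
    rw [hk] at hmem
    simp only [List.mem_cons, List.not_mem_nil, or_false] at hmem
    rcases hmem with h | h | h | h
    exacts [h1 h, h2 h, h3 h, h4 h]
  unfold pvPatternOf
  rw [hc, if_neg Bool.false_ne_true]
  decide

-- ===== VERDICT (by name: the statement is the Claim_ definition above) =====
theorem apply_variety_pattern_spec : Claim_equal_apply_variety_pattern := by
  intro name bc _
  unfold Spec_apply_variety_pattern apply_variety_pattern apply_variety_pattern_alt
  by_cases h1 : name = "energetic"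
  · subst h1
    simp only [show pvPatternOf "energetic" = [1, 1, 2, 1, 1, 4] from by decide,
      show ([1, 1, 2, 1, 1, 4] : List Int).sum = 10 from by decide]
    exact main_energetic bc.toNat bc.toNat bc le_rfl le_rfl
  by_cases h2 : name = "buildup"
  · subst h2
    simp only [show pvPatternOf "buildup" = [4, 2, 2, 1, 1, 1] from by decide,
      show ([4, 2, 2, 1, 1, 1] : List Int).sum = 11 from by decide]
    exact main_buildup bc.toNat bc.toNat bc le_rfl le_rfl
  by_cases h3 : name = "balanced"
  · subst h3
    simp only [show pvPatternOf "balanced" = [2, 1, 2, 4, 2, 1] from by decide,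
      show ([2, 1, 2, 4, 2, 1] : List Int).sum = 12 from by decide]
    exact main_balanced bc.toNat bc.toNat bc le_rfl le_rfl
  by_cases h4 : name = "dramatic"
  · subst h4
    simp only [show pvPatternOf "dramatic" = [1, 1, 1, 1, 8] from by decide,
      show ([1, 1, 1, 1, 8] : List Int).sum = 12 from by decide]
    exact main_dramatic bc.toNat bc.toNat bc le_rfl le_rfl
  · simp only [pvPatternOf_default name h1 h2 h3 h4,
      show ([2, 1, 2, 4, 2, 1] : List Int).sum = 12 from by decide]
    exact main_balanced bc.toNat bc.toNat bc le_rfl le_rfl
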